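-- pv_equiv track=rewrite | github.com/maxwizard01/Algebra | Symmetric group/SubgroupSn.py | possiblePerm
-- ===== SOURCE A (Python) =====
-- def lengthCategorize(arr):
--     newArr=[]
--     for element in arr:
--         sortlength=[len(i) for i in element]
--         #sortlength.sort()
--         newArr.append(sortlength)
--     return newArr
--
-- def removeDuplicate(arr):
--     newOne=[]
--     for i in arr:
--         if(i not in newOne):
--             newOne.append(i)
--     return newOne
--
-- def possiblePerm(cycArr):
--     m=lengthCategorize(cycArr)
--     keys=removeDuplicate(m)
--     j={}
--     for key in keys:
--         j[str(key)]=0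
--     for element in m:
--         j[str(element)]+=1
--     return j
-- ===== SOURCE B (Python) =====
-- def possiblePerm(cycArr):
--     counts = {}
--     for perm in cycArr:
--         key = str([len(cycle) for cycle in perm])
--         counts[key] = counts.get(key, 0) + 1
--     return counts
-- ===== Notes on version B (the rewrite author's own statement) =====
-- stated objective: simpler
-- what changed: Replaced A's four phases (build signature list, first-occurrence dedup via list membership, zero-init pass over keys, recount pass) with a single pass that accumulates counts in a dict via get, so the dedup and the two extra passes disappear.
import Mathlib
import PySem

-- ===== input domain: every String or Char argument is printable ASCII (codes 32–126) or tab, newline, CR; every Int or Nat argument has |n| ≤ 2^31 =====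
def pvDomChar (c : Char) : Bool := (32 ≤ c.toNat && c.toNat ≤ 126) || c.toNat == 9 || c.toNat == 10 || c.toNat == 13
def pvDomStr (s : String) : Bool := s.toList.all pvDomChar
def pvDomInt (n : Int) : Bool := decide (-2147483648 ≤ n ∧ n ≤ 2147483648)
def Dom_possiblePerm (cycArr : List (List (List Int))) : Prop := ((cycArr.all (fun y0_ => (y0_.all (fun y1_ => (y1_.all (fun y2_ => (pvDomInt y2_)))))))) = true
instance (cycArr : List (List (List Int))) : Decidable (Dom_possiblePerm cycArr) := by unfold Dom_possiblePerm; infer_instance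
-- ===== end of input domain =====

-- B replaces A's four phases (signature list, quadratic membership-test dedup, zero-init pass,
-- recount pass) by a single counting pass over the input with a dict lookup (objective: simpler).

-- shared rendering of Python's str(list_of_ints), e.g. "[1, 2]"
def listIntStr (key : List Int) : String :=
  "[" ++ String.intercalate ", " (key.map PySem.Int.toStr) ++ "]"

-- ===== PORT A =====
def lengthCategorize (arr : List (List (List Int))) : List (List Int) :=
  arr.foldl (fun newArr element => newArr ++ [element.map (fun i => (i.length : Int))]) []

def removeDuplicate (arr : List (List Int)) : List (List Int) :=
  arr.foldl (fun newOne i => if i ∈ newOne then newOne else newOne ++ [i]) []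

def possiblePerm (cycArr : List (List (List Int))) : List (String × Int) :=
  let m := lengthCategorize cycArr
  let keys := removeDuplicate m
  let j : PySem.Dict String Int :=
    keys.foldl (fun d key => d.insert (listIntStr key) 0) PySem.Dict.empty
  -- j[str(element)] += 1 : the key is always present (inserted above), so modify is exact here
  let j := m.foldl (fun d element => d.modify (listIntStr element) 0 (· + 1)) j
  j.items

-- ===== PORT B =====
def possiblePerm_alt (cycArr : List (List (List Int))) : List (String × Int) :=
  (cycArr.foldl
    (fun counts perm =>
      let key := listIntStr (perm.map (fun cycle => (cycle.length : Int)))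
      counts.insert key (counts.getD key 0 + 1))
    PySem.Dict.empty).items

-- ===== PRECONDITION & SPEC =====
def Spec_possiblePerm (cycArr : List (List (List Int))) (out : List (String × Int)) : Prop := out = possiblePerm_alt cycArr
instance (cycArr : List (List (List Int))) (out : List (String × Int)) : Decidable (Spec_possiblePerm cycArr out) := by unfold Spec_possiblePerm; infer_instance

-- ===== CLAIM (what is proved, stated in full; the proofs are below) =====
def Claim_equal_possiblePerm : Prop := ∀ (cycArr : List (List (List Int))), Dom_possiblePerm cycArr → Spec_possiblePerm cycArr (possiblePerm cycArr)

-- ===== LEMMAS AND PROOFS =====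

theorem foldl_append_map {α β : Type} (l : List α) (f : α → β) (a : List β) :
    l.foldl (fun acc x => acc ++ [f x]) a = a ++ l.map f := by
  induction l generalizing a with
  | nil => simp
  | cons x l ih => simp [List.foldl, ih]

theorem set_add_of_mem {α : Type} [BEq α] [LawfulBEq α] (s : PySem.Set α) (x : α) (h : x ∈ s) :
    PySem.Set.add s x = s := by
  simp [PySem.Set.add, PySem.Set.contains, h]

theorem removeDuplicate_eq {α : Type} [BEq α] [LawfulBEq α] [DecidableEq α] (arr : List α) :
    arr.foldl (fun newOne i => if i ∈ newOne then newOne else newOne ++ [i]) [] = PySem.Set.ofList arr := by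
  rw [PySem.Set.ofList_eq_foldl]
  congr 1
  funext s x
  simp [PySem.Set.add, PySem.Set.contains]

theorem set_update_of_subset {α : Type} [BEq α] [LawfulBEq α] (s : PySem.Set α) (l : List α)
    (h : ∀ x ∈ l, x ∈ s) : PySem.Set.update s l = s := by
  induction l generalizing s with
  | nil => simp [PySem.Set.update]
  | cons x l ih =>
      rw [PySem.Set.update_cons, set_add_of_mem s x (h x (by simp))]
      exact ih s (fun y hy => h y (by simp [hy]))

theorem ofList_map_ofList {α β : Type} [BEq α] [LawfulBEq α] [BEq β] [LawfulBEq β]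
    (f : α → β) (m : List α) :
    PySem.Set.ofList ((PySem.Set.ofList m).map f) = PySem.Set.ofList (m.map f) := by
  induction m using List.reverseRecOn with
  | nil => rfl
  | append_singleton ms x ih =>
      rw [PySem.Set.ofList_append_singleton]
      by_cases hx : x ∈ PySem.Set.ofList ms
      · rw [set_add_of_mem _ _ hx, ih]
        simp only [List.map_append, List.map_cons, List.map_nil]
        rw [PySem.Set.ofList_append_singleton, set_add_of_mem]
        have hm : x ∈ ms := (PySem.Set.mem_ofList _ _).1 hx
        exact (PySem.Set.mem_ofList _ _).2 (List.mem_map_of_mem hm)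
      · rw [show PySem.Set.add (PySem.Set.ofList ms) x = PySem.Set.ofList ms ++ [x] by
            simp [PySem.Set.add, PySem.Set.contains]
            intro h; exact absurd ((PySem.Set.mem_ofList _ _).2 h) hx]
        simp only [List.map_append, List.map_cons, List.map_nil]
        rw [PySem.Set.ofList_append_singleton, ih, PySem.Set.ofList_append_singleton]

theorem getD_foldl_insert_zero {β : Type} (g : β → String) (l : List β) (d : PySem.Dict String Int)
    (h : ∀ k, d.getD k 0 = 0) (k : String) :
    (l.foldl (fun d key => d.insert (g key) 0) d).getD k 0 = 0 := by
  induction l generalizing d with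
  | nil => exact h k
  | cons x l ih =>
      refine ih _ (fun k' => ?_)
      rw [PySem.Dict.getD_insert]
      split <;> simp [h]

-- the items of A's init-then-count dict over ms, characterised as a counting map
theorem countdict_items (ms : List (List Int)) :
    ((List.map listIntStr ms).foldl (fun d x => d.modify x 0 (· + 1))
       ((PySem.Set.ofList ms).foldl (fun d key => d.insert (listIntStr key) 0) PySem.Dict.empty)).items
    = List.map (fun k => (k, ((List.map listIntStr ms).count k : Int)))
        (PySem.Set.ofList (List.map listIntStr ms)) := by
  set sigs : List String := List.map listIntStr ms with hsigs
  set j0 : PySem.Dict String Int :=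
    (PySem.Set.ofList ms).foldl (fun d key => d.insert (listIntStr key) 0) PySem.Dict.empty with hj0
  set j : PySem.Dict String Int := sigs.foldl (fun d x => d.modify x 0 (· + 1)) j0 with hj
  have hkeys0 : j0.keys = PySem.Set.ofList sigs := by
    rw [hj0, PySem.Dict.keys_foldl_insert_key _ listIntStr]
    show PySem.Set.update [] _ = _
    rw [PySem.Set.update_nil_left, ofList_map_ofList]
  have hkeys : j.keys = PySem.Set.ofList sigs := by
    rw [hj, PySem.Dict.keys_foldl_modify, hkeys0, set_update_of_subset]
    intro x hx; exact (PySem.Set.mem_ofList _ _).2 hx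
  have hgetD : ∀ k, j.getD k 0 = (sigs.count k : Int) := by
    intro k
    rw [hj, PySem.Dict.getD_foldl_modify_add_one, hj0, getD_foldl_insert_zero]
    · simp
    · intro k'; rfl
  rw [PySem.Dict.items_eq_map_keys j (by rw [hkeys]; exact PySem.Set.nodup_ofList _) 0, hkeys]
  exact List.map_congr_left (fun k _ => by rw [hgetD k])

theorem main_eq (cycArr : List (List (List Int))) :
    possiblePerm cycArr = possiblePerm_alt cycArr := by
  unfold possiblePerm possiblePerm_alt lengthCategorize removeDuplicate
  have hm := foldl_append_map cycArr (fun element => List.map (fun i => ((i.length : Int))) element) []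
  rw [List.nil_append] at hm
  simp only [hm, removeDuplicate_eq]
  rw [← List.foldl_map (f := listIntStr)
        (g := fun (d : PySem.Dict String Int) (x : String) => d.modify x 0 (· + 1)),
      countdict_items]
  rw [← List.foldl_map (f := fun (perm : List (List Int)) => listIntStr (List.map (fun (cycle : List Int) => ((cycle.length : Int))) perm))
        (g := fun (d : PySem.Dict String Int) (x : String) => d.insert x (d.getD x 0 + 1)),
      PySem.Dict.foldl_insert_getD_add_one_eq_counter, PySem.Dict.items_counter, List.map_map]
  simp [Function.comp_def]

-- ===== VERDICT (by name: the statement is the Claim_ definition above) =====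
theorem possiblePerm_spec : Claim_equal_possiblePerm :=
  fun cycArr _ => main_eq cycArr
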